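-- pv_equiv track=rewrite | github.com/moyamao/ReportClaw | src/reportclaw/report_scoring.py | _mask_spans
-- ===== SOURCE A (Python) =====
-- from typing import Any, Dict, Iterable, List, Optional, Tuple
--
-- def _mask_spans(text: str, needle: str) -> Tuple[str, int]:
--     """Count needle occurrences and mask them to prevent overlap double-count."""
--     if not needle:
--         return text, 0
--     cnt = 0
--     start = 0
--     out = []
--     n = len(needle)
--     while True:
--         idx = text.find(needle, start)
--         if idx < 0:
--             out.append(text[start:])
--             break
--         cnt += 1
--         out.append(text[start:idx])
--         out.append("\u2588" * n)  # mask block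
--         start = idx + n
--     return "".join(out), cnt
-- ===== SOURCE B (Python) =====
-- from typing import Tuple
--
-- def _mask_spans(text: str, needle: str) -> Tuple[str, int]:
--     """Count needle occurrences and mask them to prevent overlap double-count."""
--     if not needle:
--         return text, 0
--     n = len(needle)
--     block = "\u2588" * n
--     out = []
--     cnt = 0
--     i = 0
--     L = len(text)
--     while i < L:
--         if text.startswith(needle, i):
--             out.append(block)
--             cnt += 1
--             i += n
--         else:
--             out.append(text[i])
--             i += 1
--     return "".join(out), cnt
-- ===== Notes on version B (the rewrite author's own statement) =====
-- stated objective: alternative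
-- what changed: Instead of repeatedly calling text.find and copying whole between-match slices, B makes a single per-position scan: at each index it tests startswith, emitting either the mask block (advancing by len(needle)) or the single character (advancing by 1), counting matches as it goes.
import Mathlib
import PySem

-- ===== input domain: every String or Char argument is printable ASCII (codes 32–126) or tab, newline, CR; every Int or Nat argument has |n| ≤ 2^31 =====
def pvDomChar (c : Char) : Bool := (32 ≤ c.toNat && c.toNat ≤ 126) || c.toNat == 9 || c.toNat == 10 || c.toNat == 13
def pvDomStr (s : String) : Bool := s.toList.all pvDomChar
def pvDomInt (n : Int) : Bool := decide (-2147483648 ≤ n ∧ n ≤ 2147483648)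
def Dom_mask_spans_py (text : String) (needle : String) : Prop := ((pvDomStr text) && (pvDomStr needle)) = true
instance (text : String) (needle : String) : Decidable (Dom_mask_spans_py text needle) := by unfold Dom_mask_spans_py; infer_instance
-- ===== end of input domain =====

-- ===== PORT A =====
-- B replaces A's find/slice loop by a per-position startswith scan; equivalence is about the return value.

-- A's `while True` loop: state (cnt, start, out); fuel only makes the recursion total
-- (start grows by at least len(needle) ≥ 1 each round, so fuel = len(text)+1 suffices).
def maskSpansLoop (text needle : String) (n : Nat) (fuel : Nat)
    (cnt : Int) (start : Int) (out : List String) : List String × Int :=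
  match fuel with
  | 0 => (out, cnt)   -- never reached for fuel > len(text) - start
  | fuel + 1 =>
    let idx := PySem.Str.findFrom text needle start
    if idx < 0 then
      (out ++ [PySem.Str.slice text (some start) none], cnt)
    else
      maskSpansLoop text needle n fuel (cnt + 1) (idx + (n : Int))
        (out ++ [PySem.Str.slice text (some start) (some idx),
                 -- "\u2588" * n : string repetition, ported via pyRepeat on code points (exact)
                 String.ofList (PySem.List.pyRepeat ['\u2588'] (n : Int))])

def mask_spans_py (text : String) (needle : String) : String × Int :=
  if PySem.Str.len needle = 0 then (text, 0)
  else
    let n := needle.toList.length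
    let r := maskSpansLoop text needle n (text.toList.length + 1) 0 0 []
    (PySem.Str.join "" r.1, r.2)

-- ===== PORT B =====
-- B's `while i < L` loop: the index i is represented by the remaining suffix l = text[i:];
-- `text.startswith(needle, i)` is isPrefixOf on that suffix (exact); `out.append(...)`
-- followed by ''.join is the char-list accumulator acc (exact). Fuel = len(text) only
-- makes the recursion total (each iteration consumes ≥ 1 char since needle ≠ '').
def altLoop (sub mask : List Char) : Nat → List Char → List Char → Int → List Char × Int
  | 0, _, acc, cnt => (acc, cnt)            -- never reached for fuel ≥ l.length
  | _ + 1, [], acc, cnt => (acc, cnt)       -- loop guard i < L fails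
  | fuel + 1, c :: t, acc, cnt =>
    if sub.isPrefixOf (c :: t) then
      altLoop sub mask fuel ((c :: t).drop sub.length) (acc ++ mask) (cnt + 1)
    else
      altLoop sub mask fuel t (acc ++ [c]) cnt

def mask_spans_py_alt (text : String) (needle : String) : String × Int :=
  if PySem.Str.len needle = 0 then (text, 0)
  else
    -- block = "\u2588" * len(needle), ported via pyRepeat on code points (exact)
    let block := PySem.List.pyRepeat ['\u2588'] ((needle.toList.length : Int))
    let r := altLoop needle.toList block text.toList.length text.toList [] 0
    (String.ofList r.1, r.2)

-- ===== PRECONDITION & SPEC =====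
def Spec_mask_spans_py (text : String) (needle : String) (out : String × Int) : Prop := out = mask_spans_py_alt text needle
instance (text : String) (needle : String) (out : String × Int) : Decidable (Spec_mask_spans_py text needle out) := by unfold Spec_mask_spans_py; infer_instance

-- ===== CLAIM (what is proved, stated in full; the proofs are below) =====
def Claim_equal_mask_spans_py : Prop := ∀ (text : String) (needle : String), Dom_mask_spans_py text needle → Spec_mask_spans_py text needle (mask_spans_py text needle)

-- ===== LEMMAS AND PROOFS =====

-- join with empty separator is flatten
theorem joinNil (l : List (List Char)) : PySem.Chars.join [] l = l.flatten := by
  unfold PySem.Chars.join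
  induction l with
  | nil => rfl
  | cons a t ih =>
    cases t with
    | nil => simp [List.intercalate]
    | cons b u =>
      simp only [List.intercalate, List.intersperse] at ih ⊢
      simp [List.flatten, ih]

theorem altLoop_nil (sub mask acc : List Char) (cnt : Int) (fuel : Nat) :
    altLoop sub mask fuel [] acc cnt = (acc, cnt) := by
  cases fuel <;> rfl

-- no occurrence anywhere: the scan copies the list unchanged and counts nothing
theorem altLoop_none (sub mask : List Char) :
    ∀ (l acc : List Char) (cnt : Int) (fuel : Nat), l.length ≤ fuel →
      (∀ i, ¬ sub <+: l.drop i) →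
      altLoop sub mask fuel l acc cnt = (acc ++ l, cnt) := by
  intro l
  induction l with
  | nil => intro acc cnt fuel _ _; simp [altLoop_nil]
  | cons c t ih =>
    intro acc cnt fuel hf h
    obtain ⟨f, rfl⟩ : ∃ f, fuel = f + 1 := ⟨fuel - 1, by simp at hf; omega⟩
    have h0 : ¬ sub.isPrefixOf (c::t) := by
      simpa [List.isPrefixOf_iff_prefix] using h 0
    rw [show altLoop sub mask (f+1) (c::t) acc cnt
          = altLoop sub mask f t (acc ++ [c]) cnt from by
        simp [altLoop, h0]]
    rw [ih (acc ++ [c]) cnt f (by simp at hf ⊢; omega) (fun i => h (i+1))]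
    simp

-- first occurrence at j: the scan copies take j, emits the mask, jumps over the match
theorem altLoop_found (sub mask : List Char) (hsub : sub ≠ []) :
    ∀ (j : Nat) (l acc : List Char) (cnt : Int) (fuel : Nat), l.length ≤ fuel →
      (∀ i < j, ¬ sub <+: l.drop i) → sub <+: l.drop j →
      altLoop sub mask fuel l acc cnt =
        altLoop sub mask (fuel - (j+1)) (l.drop (j + sub.length))
          (acc ++ l.take j ++ mask) (cnt + 1) := by
  intro j
  induction j with
  | zero =>
    intro l acc cnt fuel hf _ hpre
    simp only [List.drop_zero] at hpre
    obtain ⟨c, t, rfl⟩ : ∃ c t, l = c :: t := by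
      cases l with
      | nil => exact absurd (List.prefix_nil.mp hpre) hsub
      | cons c t => exact ⟨c, t, rfl⟩
    obtain ⟨f, rfl⟩ : ∃ f, fuel = f + 1 := ⟨fuel - 1, by simp at hf; omega⟩
    have h0 : sub.isPrefixOf (c::t) := List.isPrefixOf_iff_prefix.mpr hpre
    simp [altLoop, h0]
  | succ j ih =>
    intro l acc cnt fuel hf hmin hpre
    obtain ⟨c, t, rfl⟩ : ∃ c t, l = c :: t := by
      cases l with
      | nil => simp at hpre; exact absurd hpre hsub
      | cons c t => exact ⟨c, t, rfl⟩
    obtain ⟨f, rfl⟩ : ∃ f, fuel = f + 1 := ⟨fuel - 1, by simp at hf; omega⟩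
    have h0 : ¬ sub.isPrefixOf (c::t) := by
      simpa [List.isPrefixOf_iff_prefix] using hmin 0 (by omega)
    rw [show altLoop sub mask (f+1) (c::t) acc cnt
          = altLoop sub mask f t (acc ++ [c]) cnt from by
        simp [altLoop, h0]]
    rw [ih t (acc ++ [c]) cnt f (by simp at hf ⊢; omega)
          (fun i hi => hmin (i+1) (by omega)) (by simpa using hpre)]
    have e1 : f + 1 - (j + 1 + 1) = f - (j + 1) := by omega
    have e2 : List.drop (j + 1 + sub.length) (c :: t) = List.drop (j + sub.length) t := by
      rw [show j + 1 + sub.length = (j + sub.length) + 1 by omega, List.drop_succ_cons]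
    rw [e1, e2]
    simp [List.take_succ_cons]

-- accumulator/counter normalisation
theorem altLoop_acc (sub mask : List Char) :
    ∀ (fuel : Nat) (l acc : List Char) (cnt : Int),
      altLoop sub mask fuel l acc cnt =
        (acc ++ (altLoop sub mask fuel l [] 0).1, cnt + (altLoop sub mask fuel l [] 0).2) := by
  intro fuel
  induction fuel with
  | zero => intro l acc cnt; simp [altLoop]
  | succ f ih =>
    intro l acc cnt
    cases l with
    | nil => simp [altLoop_nil]
    | cons c t =>
      by_cases h : sub.isPrefixOf (c::t)
      · rw [show altLoop sub mask (f+1) (c::t) acc cnt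
              = altLoop sub mask f ((c::t).drop sub.length) (acc ++ mask) (cnt+1) from by
            simp [altLoop, h]]
        rw [show altLoop sub mask (f+1) (c::t) [] 0
              = altLoop sub mask f ((c::t).drop sub.length) ([] ++ mask) (0+1) from by
            simp [altLoop, h]]
        rw [ih _ (acc ++ mask) (cnt+1), ih _ ([] ++ mask) (0+1)]
        simp
        ring
      · rw [show altLoop sub mask (f+1) (c::t) acc cnt
              = altLoop sub mask f t (acc ++ [c]) cnt from by simp [altLoop, h]]
        rw [show altLoop sub mask (f+1) (c::t) [] 0
              = altLoop sub mask f t ([] ++ [c]) 0 from by simp [altLoop, h]]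
        rw [ih t (acc ++ [c]) cnt, ih t ([] ++ [c]) 0]
        simp

-- fuel irrelevance while fuel ≥ remaining length
theorem altLoop_fuel (sub mask : List Char) (hsub : sub ≠ []) :
    ∀ (m : Nat) (l acc : List Char) (cnt : Int) (fuel fuel' : Nat), l.length ≤ m →
      l.length ≤ fuel → l.length ≤ fuel' →
      altLoop sub mask fuel l acc cnt = altLoop sub mask fuel' l acc cnt := by
  intro m
  induction m with
  | zero =>
    intro l acc cnt fuel fuel' hm _ _
    obtain rfl : l = [] := List.length_eq_zero_iff.mp (by omega)
    rw [altLoop_nil, altLoop_nil]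
  | succ m ih =>
    intro l acc cnt fuel fuel' hm hf hf'
    cases l with
    | nil => rw [altLoop_nil, altLoop_nil]
    | cons c t =>
      obtain ⟨f, rfl⟩ : ∃ f, fuel = f + 1 := ⟨fuel - 1, by simp at hf; omega⟩
      obtain ⟨g, rfl⟩ : ∃ g, fuel' = g + 1 := ⟨fuel' - 1, by simp at hf'; omega⟩
      have hs1 : 1 ≤ sub.length := by cases sub with | nil => exact absurd rfl hsub | cons a s => simp
      by_cases h : sub.isPrefixOf (c::t)
      · rw [show altLoop sub mask (f+1) (c::t) acc cnt
              = altLoop sub mask f ((c::t).drop sub.length) (acc ++ mask) (cnt+1) from by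
            simp [altLoop, h]]
        rw [show altLoop sub mask (g+1) (c::t) acc cnt
              = altLoop sub mask g ((c::t).drop sub.length) (acc ++ mask) (cnt+1) from by
            simp [altLoop, h]]
        have hlen : ((c::t).drop sub.length).length ≤ m := by simp at hm ⊢; omega
        exact ih _ _ _ f g hlen (by simp at hf ⊢; omega) (by simp at hf' ⊢; omega)
      · rw [show altLoop sub mask (f+1) (c::t) acc cnt
              = altLoop sub mask f t (acc ++ [c]) cnt from by simp [altLoop, h]]
        rw [show altLoop sub mask (g+1) (c::t) acc cnt
              = altLoop sub mask g t (acc ++ [c]) cnt from by simp [altLoop, h]]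
        exact ih t (acc ++ [c]) cnt f g (by simp at hm ⊢; omega)
          (by simp at hf ⊢; omega) (by simp at hf' ⊢; omega)

-- appending one string under "".join
theorem joinStr_append (out : List String) (s : String) :
    (PySem.Str.join "" (out ++ [s])).toList = (PySem.Str.join "" out).toList ++ s.toList := by
  simp [PySem.Str.join, joinNil]

-- no occurrence of sub anywhere in l, as prefix positions
theorem no_prefix_of_find_neg (l sub : List Char) (h : PySem.Chars.find l sub = -1) :
    ∀ i, ¬ sub <+: l.drop i := by
  intro i hpre
  have hin : PySem.Chars.isIn sub l = true :=
    PySem.Chars.exists_prefix_drop_iff_isIn sub l |>.mp ⟨i, hpre⟩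
  rw [PySem.Chars.isIn_iff_infix] at hin
  exact (PySem.Chars.find_eq_neg_one_iff l sub |>.mp h) hin

-- the main loop invariant: from position k, A's loop produces exactly what B's scan
-- of the suffix text[k:] produces (appended to out / added to cnt)
theorem loop_eq (text needle : String) (hsub : needle.toList ≠ []) :
    ∀ (fuel k : Nat) (cnt : Int) (out : List String),
      k ≤ text.toList.length → text.toList.length - k < fuel →
      (PySem.Str.join "" (maskSpansLoop text needle needle.toList.length fuel cnt (k : Int) out).1).toList
          = (PySem.Str.join "" out).toList ++
            (altLoop needle.toList (PySem.List.pyRepeat ['\u2588'] ((needle.toList.length : Int)))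
              (text.toList.drop k).length (text.toList.drop k) [] 0).1
      ∧ (maskSpansLoop text needle needle.toList.length fuel cnt (k : Int) out).2
          = cnt + (altLoop needle.toList (PySem.List.pyRepeat ['\u2588'] ((needle.toList.length : Int)))
              (text.toList.drop k).length (text.toList.drop k) [] 0).2 := by
  intro fuel
  induction fuel with
  | zero => intro k cnt out hk hf; omega
  | succ f ih =>
    intro k cnt out hk hf
    set t := text.toList with ht
    set sub := needle.toList with hsubdef
    set l := t.drop k with hl
    set mask := PySem.List.pyRepeat ['\u2588'] ((sub.length : Int)) with hmask
    have hidx : PySem.Str.findFrom text needle (k : Int) none =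
        if PySem.Chars.find l sub = -1 then -1 else (k : Int) + PySem.Chars.find l sub := by
      rw [PySem.Str.findFrom_eq]
      exact PySem.Chars.findFrom_natCast t sub k hk
    by_cases hfind : PySem.Chars.find l sub = -1
    · -- no further occurrence: A emits the tail and stops; B's scan copies the suffix
      have hstep : maskSpansLoop text needle sub.length (f+1) cnt (k : Int) out =
          (out ++ [PySem.Str.slice text (some (k : Int)) none], cnt) := by
        simp only [maskSpansLoop, hidx, hfind, if_pos]
        norm_num
      have hnone := no_prefix_of_find_neg l sub hfind
      rw [hstep, altLoop_none sub mask l [] 0 l.length le_rfl hnone]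
      constructor
      · rw [joinStr_append]
        simp [PySem.Str.slice, PySem.Chars.slice_eq_listSlice, PySem.List.slice_from_natCast]
        exact hl.symm
      · simp
    · -- an occurrence at j: A emits prefix + mask and jumps; B's scan does the same
      have hge : 0 ≤ PySem.Chars.find l sub := by
        rcases lt_or_ge (PySem.Chars.find l sub) 0 with h | h
        · exfalso
          have := PySem.Chars.neg_one_le_find l sub
          interval_cases h' : PySem.Chars.find l sub
          · exact hfind rfl
        · exact h
      have hsub1 : 1 ≤ sub.length := by
        have := List.length_pos_of_ne_nil hsub
        omega
      set j := (PySem.Chars.find l sub).toNat with hj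
      have hjcast : PySem.Chars.find l sub = (j : Int) := (Int.toNat_of_nonneg hge).symm
      obtain ⟨hpre, hmin⟩ := PySem.Chars.find_spec hge
      have hjlen : j + sub.length ≤ l.length := by
        have h1 := hpre.length_le
        have h2 := PySem.Chars.find_le_length l sub
        simp at h1
        omega
      have hidx' : PySem.Str.findFrom text needle (k : Int) none = ((k + j : Nat) : Int) := by
        rw [hidx, if_neg hfind, hjcast]; push_cast; ring
      have hstep : maskSpansLoop text needle sub.length (f+1) cnt (k : Int) out =
          maskSpansLoop text needle sub.length f (cnt + 1) (((k + j : Nat) : Int) + (sub.length : Int))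
            (out ++ [PySem.Str.slice text (some (k : Int)) (some ((k + j : Nat) : Int)),
                     String.ofList (PySem.List.pyRepeat ['\u2588'] ((sub.length : Int)))]) := by
        simp only [maskSpansLoop, hidx']
        rw [if_neg (by omega)]
      have hcast : ((k + j : Nat) : Int) + (sub.length : Int) = ((k + j + sub.length : Nat) : Int) := by
        push_cast; ring
      set k' := k + j + sub.length with hk'
      have hk'le : k' ≤ t.length := by
        have : l.length = t.length - k := by simp [hl]
        omega
      have hrec := ih k' (cnt + 1)
        (out ++ [PySem.Str.slice text (some (k : Int)) (some ((k + j : Nat) : Int)),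
                 String.ofList (PySem.List.pyRepeat ['\u2588'] ((sub.length : Int)))])
        hk'le (by omega)
      rw [hstep, hcast]
      set l' := t.drop k' with hl'
      have hl'eq : l' = l.drop (j + sub.length) := by
        simp [hl', hl, hk', List.drop_drop]
        ring_nf
      have hslice : (PySem.Str.slice text (some (k : Int)) (some ((k + j : Nat) : Int))).toList
          = l.take j := by
        simp [PySem.Str.slice, PySem.Chars.slice_eq_listSlice, hl]
        rw [show ((k : Int) + (j : Int)) = ((k + j : Nat) : Int) by push_cast; ring]
        rw [PySem.List.slice_natCast]
        simp
        rfl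
      have hjoin2 : ∀ (o : List String) (x y : String),
          (PySem.Str.join "" (o ++ [x, y])).toList
            = (PySem.Str.join "" o).toList ++ x.toList ++ y.toList := by
        intro o x y
        rw [show o ++ [x, y] = (o ++ [x]) ++ [y] from by simp,
            joinStr_append, joinStr_append]
      have hBside : altLoop sub mask l.length l [] 0 =
          ((l.take j ++ mask) ++ (altLoop sub mask l'.length l' [] 0).1,
           1 + (altLoop sub mask l'.length l' [] 0).2) := by
        rw [altLoop_found sub mask hsub j l [] 0 l.length le_rfl
              (fun i hi => hmin i (by omega)) hpre]
        rw [altLoop_acc sub mask (l.length - (j+1)) (l.drop (j + sub.length))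
              ([] ++ l.take j ++ mask) (0 + 1)]
        rw [altLoop_fuel sub mask hsub l'.length (l.drop (j + sub.length)) [] 0
              (l.length - (j+1)) l'.length (by rw [← hl'eq]) (by simp; omega) (by rw [← hl'eq])]
        rw [← hl'eq]
        simp
      constructor
      · rw [hrec.1, hjoin2, hBside]
        rw [hslice]
        simp [hmask]
      · rw [hrec.2, hBside]
        push_cast
        ring

-- ===== VERDICT (by name: the statement is the Claim_ definition above) =====
theorem mask_spans_py_spec : Claim_equal_mask_spans_py := by
  intro text needle _
  unfold Spec_mask_spans_py mask_spans_py mask_spans_py_alt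
  by_cases h0 : PySem.Str.len needle = 0
  · rw [if_pos h0, if_pos h0]
  · rw [if_neg h0, if_neg h0]
    have hsub : needle.toList ≠ [] := by
      simp [PySem.Str.len] at h0
      simpa using h0
    obtain ⟨hfst, hsnd⟩ := loop_eq text needle hsub (text.toList.length + 1) 0 0 []
      (by omega) (by omega)
    simp only [Nat.cast_zero, List.drop_zero] at hfst hsnd
    have hjoin : (PySem.Str.join "" ([] : List String)).toList = [] := by
      simp [PySem.Str.join]
    refine Prod.ext ?_ ?_
    · apply String.toList_inj.mp
      show (PySem.Str.join ""
          (maskSpansLoop text needle needle.toList.length (text.toList.length + 1) 0 0 []).1).toList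
        = (String.ofList
            (altLoop needle.toList (PySem.List.pyRepeat ['\u2588'] ((needle.toList.length : Int)))
              text.toList.length text.toList [] 0).1).toList
      rw [hfst, hjoin]
      simp
    · show (maskSpansLoop text needle needle.toList.length (text.toList.length + 1) 0 0 []).2
        = (altLoop needle.toList (PySem.List.pyRepeat ['\u2588'] ((needle.toList.length : Int)))
            text.toList.length text.toList [] 0).2
      rw [hsnd]
      simp
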